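-- pv_equiv track=rewrite | github.com/medhidev/Identicon | main.py | symetrie
-- ===== SOURCE A (Python) =====
-- def symetrie(matrice):
--     n = len(matrice)
--     m = len(matrice[0])
--
--     symetrie = [[0 for j in range(m)] for i in range(n)]
--
--     for i in range(n):
--         for j in range(m):
--             if (j >= m//2):
--                 symetrie[i][j] = matrice[i][m-j-1]
--             else:
--                 symetrie[i][j] = matrice[i][j]
--
--     return symetrie
-- ===== SOURCE B (Python) =====
-- def symetrie(matrice):
--     m = len(matrice[0])
--     h = m // 2
--     res = []
--     for row in matrice:
--         left = row[:h]
--         middle = row[h:h + (m % 2)]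
--         res.append(left + middle + left[::-1])
--     return res
-- ===== Notes on version B (the rewrite author's own statement) =====
-- stated objective: simpler
-- what changed: Replaces the zero-matrix-then-per-cell-conditional-assignment nested loops with direct per-row construction by slicing: left half + optional middle element + reversed left half.
import Mathlib
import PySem

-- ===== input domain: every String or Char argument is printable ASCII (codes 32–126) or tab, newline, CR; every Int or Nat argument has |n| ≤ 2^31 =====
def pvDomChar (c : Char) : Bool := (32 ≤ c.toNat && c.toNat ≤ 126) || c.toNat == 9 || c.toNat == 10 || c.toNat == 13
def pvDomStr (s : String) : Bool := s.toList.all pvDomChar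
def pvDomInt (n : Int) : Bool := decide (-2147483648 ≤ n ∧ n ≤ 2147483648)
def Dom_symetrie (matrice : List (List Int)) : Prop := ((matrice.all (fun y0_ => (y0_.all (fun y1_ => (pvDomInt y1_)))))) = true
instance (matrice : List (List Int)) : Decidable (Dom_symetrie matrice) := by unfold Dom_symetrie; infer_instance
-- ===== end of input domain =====

-- B replaces A's zero-matrix + per-cell conditional assignment by building each row
-- directly as left-half ++ optional middle ++ reversed left-half (slices); return-value
-- equivalence only (neither program mutates its argument).

-- ===== PORT A =====
def symetrie (matrice : List (List Int)) : List (List Int) :=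
  let n : Int := matrice.length
  let m : Int := (PySem.List.pyGetD matrice 0 []).length
  let s0 : List (List Int) :=
    (PySem.List.pyRange 0 n 1).map (fun _ => (PySem.List.pyRange 0 m 1).map (fun _ => (0 : Int)))
  (PySem.List.pyRange 0 n 1).foldl (fun s i =>
    (PySem.List.pyRange 0 m 1).foldl (fun s j =>
      let v : Int :=
        if PySem.Int.floordiv m 2 ≤ j then
          PySem.List.pyGetD (PySem.List.pyGetD matrice i []) (m - j - 1) 0
        else
          PySem.List.pyGetD (PySem.List.pyGetD matrice i []) j 0
      PySem.List.pySetD s i (PySem.List.pySetD (PySem.List.pyGetD s i []) j v)) s) s0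

-- ===== PORT B =====
def symetrie_alt (matrice : List (List Int)) : List (List Int) :=
  let m : Int := (PySem.List.pyGetD matrice 0 []).length
  let h : Int := PySem.Int.floordiv m 2
  matrice.foldl (fun res row =>
    let left := PySem.List.slice row (some 0) (some h)
    let middle := PySem.List.slice row (some h) (some (h + PySem.Int.mod m 2))
    res ++ [left ++ middle ++ (PySem.List.slice? left none none (-1)).getD []]) []

-- ===== PRECONDITION & SPEC =====
-- Pre_ excludes exactly the inputs where the Python A raises IndexError: the empty
-- matrix (matrice[0]) and matrices with a row shorter than ceil(m/2) (A reads
-- matrice[i][j] for j < m//2 and matrice[i][m-j-1] for j >= m//2).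
def Pre_symetrie (matrice : List (List Int)) : Prop :=
  matrice ≠ [] ∧ ∀ row ∈ matrice, ((matrice.headD []).length + 1) / 2 ≤ row.length
instance (matrice : List (List Int)) : Decidable (Pre_symetrie matrice) := by
  unfold Pre_symetrie; infer_instance
def pvWitness_symetrie : List (List Int) := [[1, 2, 3], [4, 5, 6]]
def Spec_symetrie (matrice : List (List Int)) (out : List (List Int)) : Prop := out = symetrie_alt matrice
instance (matrice : List (List Int)) (out : List (List Int)) : Decidable (Spec_symetrie matrice out) := by unfold Spec_symetrie; infer_instance

-- ===== CLAIM (what is proved, stated in full; the proofs are below) =====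
def Claim_equal_symetrie : Prop := ∀ (matrice : List (List Int)), Dom_symetrie matrice → Pre_symetrie matrice → Spec_symetrie matrice (symetrie matrice)

-- ===== LEMMAS AND PROOFS =====

/-- Row of A's result: mirror the left half onto the right. -/
def tgtRow (M : Nat) (row : List Int) : List Int :=
  (List.range M).map (fun j => if M / 2 ≤ j then row.getD (M - 1 - j) 0 else row.getD j 0)

/-- Generic: folding `set i (f i (current i))` over `range k` rewrites the first `k`
entries functionally and leaves the rest. -/
lemma fold_set_range_gen {α : Type} (d : α) (f : Nat → α → α) :
    ∀ (k : Nat) (s : List α), k ≤ s.length →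
    (List.range k).foldl (fun t i => t.set i (f i (t.getD i d))) s
      = (List.range k).map (fun i => f i (s.getD i d)) ++ s.drop k := by
  intro k
  induction k with
  | zero => simp
  | succ k ih =>
    intro s hk
    have hks : k < s.length := by omega
    rw [List.range_succ, List.foldl_append, ih s (by omega)]
    have hlen : ((List.range k).map (fun i => f i (s.getD i d))).length = k := by simp
    have hgetD : (((List.range k).map (fun i => f i (s.getD i d))) ++ s.drop k).getD k d
        = s.getD k d := by
      simp [List.getD_eq_getElem?_getD, List.getElem?_append_right, List.getElem?_drop]
    simp only [List.foldl_cons, List.foldl_nil, hgetD]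
    rw [List.set_append_right _ _ (by omega), hlen, Nat.sub_self]
    rw [List.drop_eq_getElem_cons hks]
    simp [List.getD_eq_getElem?_getD, List.getElem?_eq_getElem hks]
    rw [List.drop_eq_getElem_cons hks, List.set_cons_zero]

lemma fold_set_range_const (w : Nat → Int) (k : Nat) (r : List Int) (h : k ≤ r.length) :
    (List.range k).foldl (fun t j => t.set j (w j)) r = (List.range k).map w ++ r.drop k := by
  have := fold_set_range_gen 0 (fun j _ => w j) k r h
  simpa using this

lemma fold_rowop (i : Nat) (w : Nat → Int) :
    ∀ (gs : List Nat) (s : List (List Int)), i < s.length →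
    gs.foldl (fun t j => t.set i ((t.getD i []).set j (w j))) s
      = s.set i (gs.foldl (fun r j => r.set j (w j)) (s.getD i [])) := by
  intro gs
  induction gs with
  | nil =>
    intro s hi
    simp [List.getD_eq_getElem?_getD, List.getElem?_eq_getElem hi]
  | cons j gs ih =>
    intro s hi
    simp only [List.foldl_cons]
    rw [ih _ (by simpa using hi), List.set_set]
    congr 2
    simp [List.getD_eq_getElem?_getD, hi]

lemma fold2d (v : Nat → Nat → Int) (M : Nat) :
    ∀ (k : Nat) (s : List (List Int)), k ≤ s.length →
    (List.range k).foldl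
        (fun s i => (List.range M).foldl (fun t j => t.set i ((t.getD i []).set j (v i j))) s) s
      = (List.range k).map
          (fun i => (List.range M).foldl (fun r j => r.set j (v i j)) (s.getD i [])) ++ s.drop k := by
  intro k
  induction k with
  | zero => simp
  | succ k ih =>
    intro s hk
    have hks : k < s.length := by omega
    rw [List.range_succ, List.foldl_append, ih s (by omega)]
    simp only [List.foldl_cons, List.foldl_nil]
    rw [fold_rowop k (v k) (List.range M) _ (by simp; omega)]
    have hlen : ((List.range k).map
        (fun i => (List.range M).foldl (fun r j => r.set j (v i j)) (s.getD i []))).length = k := by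
      simp
    have hgetD : (((List.range k).map
          (fun i => (List.range M).foldl (fun r j => r.set j (v i j)) (s.getD i []))) ++
          s.drop k).getD k [] = s.getD k [] := by
      simp [List.getD_eq_getElem?_getD, List.getElem?_append_right, List.getElem?_drop]
    rw [hgetD, List.set_append_right _ _ (by omega), hlen, Nat.sub_self]
    rw [List.drop_eq_getElem_cons hks, List.set_cons_zero]
    simp [List.getD_eq_getElem?_getD, List.getElem?_eq_getElem hks]

lemma symetrie_eq_map (matrice : List (List Int)) :
    symetrie matrice = matrice.map (tgtRow (matrice.getD 0 []).length) := by
  have hf : PySem.Int.floordiv ((matrice.getD 0 []).length : Int) 2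
      = (((matrice.getD 0 []).length / 2 : Nat) : Int) := by
    exact_mod_cast PySem.Int.floordiv_natCast (matrice.getD 0 []).length 2
  unfold symetrie
  simp only [PySem.List.pyGetD_zero, PySem.List.pyRange_one, sub_zero, Int.toNat_natCast,
    List.foldl_map, List.map_map, zero_add, PySem.List.pySetD_natCast, PySem.List.pyGetD_natCast,
    hf, Nat.cast_le]
  rw [fold2d _ _ _ _ (by simp)]
  rw [List.drop_eq_nil_of_le (by simp), List.append_nil]
  apply List.ext_getElem
  · simp
  · intro i h1 h2
    simp only [List.length_map, List.length_range] at h1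
    rw [List.getElem_map, List.getElem_map, List.getElem_range]
    simp only [List.getD_eq_getElem?_getD, List.getElem?_map, List.getElem?_range, h1,
      Option.map_some, Option.getD_some, Function.comp_apply]
    rw [fold_set_range_const _ _ _ (by simp)]
    rw [List.drop_eq_nil_of_le (by simp), List.append_nil]
    unfold tgtRow
    apply List.map_congr_left
    intro j hj
    have hmi : matrice[i]?.getD [] = matrice[i] := by simp [List.getElem?_eq_getElem h1]
    have hjM : j < (matrice[0]?.getD []).length := by simpa using hj
    by_cases hle : (matrice[0]?.getD []).length / 2 ≤ j
    · have hcast : ((matrice[0]?.getD []).length : Int) - (j : Int) - 1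
          = (((matrice[0]?.getD []).length - 1 - j : Nat) : Int) := by omega
      simp [hle, hcast, PySem.List.pyGetD_natCast, hmi, List.getD_eq_getElem?_getD]
    · simp [hle, hmi, List.getD_eq_getElem?_getD]

lemma bRow_eq_tgtRow (M : Nat) (row : List Int) (hL : (M + 1) / 2 ≤ row.length) :
    row.take (M / 2) ++ (row.drop (M / 2)).take (M % 2) ++ (row.take (M / 2)).reverse
      = tgtRow M row := by
  have hh : M / 2 ≤ row.length := by omega
  have hm : M / 2 + M % 2 ≤ row.length := by omega
  apply List.ext_getElem
  · simp [tgtRow]; omega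
  · intro i h1 h2
    have hiM : i < M := by simpa [tgtRow] using h2
    unfold tgtRow
    rw [List.getElem_map, List.getElem_range]
    simp only [List.getElem_append, List.length_append, List.length_take]
    by_cases c1 : i < M / 2
    · rw [dif_pos (by simp; omega), dif_pos (by simp; omega), List.getElem_take]
      rw [if_neg (by omega), List.getD_eq_getElem _ _ (by omega)]
    · by_cases c2 : i < M / 2 + M % 2
      · rw [dif_pos (by simp; omega), dif_neg (by simp; omega), List.getElem_take,
          List.getElem_drop]
        rw [if_pos (by omega), List.getD_eq_getElem _ _ (by omega)]
        congr 1
        omega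
      · rw [dif_neg (by simp; omega), List.getElem_reverse, List.getElem_take]
        rw [if_pos (by omega), List.getD_eq_getElem _ _ (by omega)]
        congr 1
        simp only [List.length_take, List.length_drop]
        omega

lemma symetrie_alt_eq_map (matrice : List (List Int)) (hp : Pre_symetrie matrice) :
    symetrie_alt matrice = matrice.map (tgtRow (matrice.getD 0 []).length) := by
  have hf : PySem.Int.floordiv ((matrice.getD 0 []).length : Int) 2
      = (((matrice.getD 0 []).length / 2 : Nat) : Int) := by
    exact_mod_cast PySem.Int.floordiv_natCast (matrice.getD 0 []).length 2
  have hmod : PySem.Int.mod ((matrice.getD 0 []).length : Int) 2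
      = (((matrice.getD 0 []).length % 2 : Nat) : Int) := by
    exact_mod_cast PySem.Int.mod_natCast (matrice.getD 0 []).length 2
  have hhd : matrice.headD [] = matrice.getD 0 [] := by cases matrice <;> rfl
  unfold symetrie_alt
  simp only [PySem.List.pyGetD_zero, hf, hmod]
  rw [PySem.List.foldl_append_singleton_eq_map, List.nil_append]
  apply List.map_congr_left
  intro row hrow
  have hL : ((matrice.getD 0 []).length + 1) / 2 ≤ row.length := by
    rw [← hhd]; exact hp.2 row hrow
  rw [PySem.List.slice?_none_none_neg_one, Option.getD_some]
  simp only [PySem.List.slice_zero_start, PySem.List.slice_to_natCast,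
    PySem.List.slice_natCast_add]
  exact bRow_eq_tgtRow _ _ hL

-- ===== VERDICT (by name: the statement is the Claim_ definition above) =====
theorem symetrie_spec : Claim_equal_symetrie := by
  intro matrice _ hp
  unfold Spec_symetrie
  rw [symetrie_eq_map matrice, symetrie_alt_eq_map matrice hp]
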